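-- pv_equiv track=rewrite | github.com/Patxi91/CodeWars_Cloud | 6kyu-Replace letters-Patxi.py | replace_letters
-- ===== SOURCE A (Python) =====
-- def replace_letters(word):
--     alphabet = ['a','b','c','d','e','f','g','h','i','j','k','l','m','n','o','p','q','r','s','t','u','v','w','x','y','z']
--     consonants = ['b','c','d','f','g','h','j','k','l','m','n','p','q','r','s','t','v','w','x','y','z']
--     vowels = ['a','e','i','o','u']
--
--     result = ""
--     for letter in word:
--         if letter in vowels:
--             index = alphabet.index(letter)
--             while True:
--                 index = (index - 1) % len(alphabet)
--                 if alphabet[index] in consonants: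
--                     result += alphabet[index]
--                     break
--         elif letter in consonants:
--             index = alphabet.index(letter)
--             while True:
--                 index = (index + 1) % len(alphabet)
--                 if alphabet[index] in vowels:
--                     result += alphabet[index]
--                     break
--         else:
--             result += letter
--
--     return result
-- ===== SOURCE B (Python) =====
-- def replace_letters(word):
--     alphabet = 'abcdefghijklmnopqrstuvwxyz'
--     vowels = 'aeiou'
--     table = {}
--     for i, c in enumerate(alphabet):
--         if c in vowels:
--             table[c] = alphabet[(i - 1) % 26]
--         else:
--             j = (i + 1) % 26
--             while alphabet[j] not in vowels:
--                 j = (j + 1) % 26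
--             table[c] = alphabet[j]
--     return word.translate(str.maketrans(table))
-- ===== Notes on version B (the rewrite author's own statement) =====
-- stated objective: idiomatic
-- what changed: Replaces the per-character scan loops (list.index plus a while-loop walk around the alphabet for every letter of the word) by a 26-entry substitution table built once with str.maketrans and a single word.translate pass.
import Mathlib
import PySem

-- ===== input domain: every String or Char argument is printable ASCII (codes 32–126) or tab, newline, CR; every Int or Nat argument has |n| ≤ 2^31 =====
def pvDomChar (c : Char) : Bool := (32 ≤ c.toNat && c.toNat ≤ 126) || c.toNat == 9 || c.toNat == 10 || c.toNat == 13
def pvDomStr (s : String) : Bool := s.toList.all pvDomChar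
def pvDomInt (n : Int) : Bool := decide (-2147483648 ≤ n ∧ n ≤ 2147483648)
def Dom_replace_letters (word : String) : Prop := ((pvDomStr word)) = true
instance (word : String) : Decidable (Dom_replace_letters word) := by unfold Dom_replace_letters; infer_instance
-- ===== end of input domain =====

-- B replaces A's per-character scan loops by a 26-entry substitution table built once
-- and a single translate pass (objective: idiomatic).

-- ===== PORT A =====
def pvAlphabet : List Char :=
  ['a','b','c','d','e','f','g','h','i','j','k','l','m','n','o','p','q','r','s','t','u','v','w','x','y','z']
def pvConsonants : List Char :=
  ['b','c','d','f','g','h','j','k','l','m','n','p','q','r','s','t','v','w','x','y','z']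
def pvVowels : List Char := ['a','e','i','o','u']

-- A's 'while True' scanning backwards for a consonant; fuel 26 covers the full cycle
-- (the loop always breaks within 26 steps; fuel exhaustion is unreachable).
def pvScanPrev (index : Int) : Nat → Char
  | 0 => ' '
  | fuel + 1 =>
    let index := PySem.Int.mod (index - 1) 26
    let c := PySem.List.pyGetD pvAlphabet index ' '
    if c ∈ pvConsonants then c else pvScanPrev index fuel

-- A's 'while True' scanning forwards for a vowel, same fuel scheme.
def pvScanNext (index : Int) : Nat → Char
  | 0 => ' '
  | fuel + 1 =>
    let index := PySem.Int.mod (index + 1) 26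
    let c := PySem.List.pyGetD pvAlphabet index ' '
    if c ∈ pvVowels then c else pvScanNext index fuel

def replace_letters (word : String) : String :=
  String.ofList (word.toList.foldl (fun result letter =>
    if letter ∈ pvVowels then
      result ++ [pvScanPrev (((PySem.List.index? pvAlphabet letter).getD 0 : Nat) : Int) 26]
    else if letter ∈ pvConsonants then
      result ++ [pvScanNext (((PySem.List.index? pvAlphabet letter).getD 0 : Nat) : Int) 26]
    else
      result ++ [letter]) [])

-- ===== PORT B =====
def pvAlphaB : List Char := "abcdefghijklmnopqrstuvwxyz".toList
def pvVowB : List Char := "aeiou".toList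

-- Source B's inner 'while alphabet[j] not in vowels: j = (j+1) % 26'; fuel 26 suffices.
def pvSeekVowel (j : Int) : Nat → Int
  | 0 => j
  | fuel + 1 =>
    if PySem.List.pyGetD pvAlphaB j ' ' ∈ pvVowB then j
    else pvSeekVowel (PySem.Int.mod (j + 1) 26) fuel

-- the substitution table Source B builds once (dict keyed by the 26 lowercase letters)
def pvTable : PySem.Dict Char Char :=
  (PySem.List.enumerate pvAlphaB 0).foldl (fun table ic =>
    if ic.2 ∈ pvVowB then
      table.insert ic.2 (PySem.List.pyGetD pvAlphaB (PySem.Int.mod (ic.1 - 1) 26) ' ')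
    else
      table.insert ic.2 (PySem.List.pyGetD pvAlphaB (pvSeekVowel (PySem.Int.mod (ic.1 + 1) 26) 26) ' '))
    PySem.Dict.empty

-- word.translate(str.maketrans(table)): each char replaced by its table entry, absent keys unchanged
def replace_letters_alt (word : String) : String :=
  String.ofList (word.toList.map (fun c => (pvTable.get? c).getD c))

-- ===== PRECONDITION & SPEC =====
def Spec_replace_letters (word : String) (out : String) : Prop := out = replace_letters_alt word
instance (word : String) (out : String) : Decidable (Spec_replace_letters word out) := by unfold Spec_replace_letters; infer_instance

-- ===== CLAIM (what is proved, stated in full; the proofs are below) =====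
def Claim_equal_replace_letters : Prop := ∀ (word : String), Dom_replace_letters word → Spec_replace_letters word (replace_letters word)

-- ===== LEMMAS AND PROOFS =====

-- A's per-letter result, pulled out of the fold body
def pvStepA (letter : Char) : Char :=
  if letter ∈ pvVowels then
    pvScanPrev (((PySem.List.index? pvAlphabet letter).getD 0 : Nat) : Int) 26
  else if letter ∈ pvConsonants then
    pvScanNext (((PySem.List.index? pvAlphabet letter).getD 0 : Nat) : Int) 26
  else letter

lemma pvKeysTable : pvTable.keys = pvAlphabet := by decide

lemma pvStep_eq (c : Char) : pvStepA c = (pvTable.get? c).getD c := by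
  by_cases h : c ∈ pvAlphabet
  · fin_cases h <;> decide
  · have hv : c ∉ pvVowels := fun hc => h (by fin_cases hc <;> decide)
    have hcons : c ∉ pvConsonants := fun hc => h (by fin_cases hc <;> decide)
    have hnone : pvTable.get? c = none :=
      (PySem.Dict.get?_eq_none_iff_not_mem_keys _ _).mpr (pvKeysTable ▸ h)
    simp [pvStepA, hv, hcons, hnone]

theorem replace_letters_spec : Claim_equal_replace_letters := by
  intro word _
  show replace_letters word = replace_letters_alt word
  unfold replace_letters replace_letters_alt
  congr 1
  have hbody : (fun (result : List Char) (letter : Char) =>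
      if letter ∈ pvVowels then
        result ++ [pvScanPrev (((PySem.List.index? pvAlphabet letter).getD 0 : Nat) : Int) 26]
      else if letter ∈ pvConsonants then
        result ++ [pvScanNext (((PySem.List.index? pvAlphabet letter).getD 0 : Nat) : Int) 26]
      else result ++ [letter]) = fun result letter => result ++ [pvStepA letter] := by
    funext result letter
    simp only [pvStepA]
    split_ifs <;> rfl
  rw [hbody, PySem.List.foldl_append_singleton_eq_map]
  simp only [List.nil_append]
  exact List.map_congr_left (fun c _ => pvStep_eq c)
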